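-- pv_equiv track=rewrite | github.com/EliFrun/my-leetcode-submissions | submissions/3946-find-maximum-balanced-xor-subarray-length/solution.py | maxBalancedSubarray
-- ===== SOURCE A (Python) =====
-- from typing import List
--
-- def maxBalancedSubarray(nums: List[int]) -> int:
--     ret = 0
--     even_cnt, odd_cnt = 0, 0
--     seen = {(0, 0): -1 }
--     curr = 0
--     for i, num in enumerate(nums):
--         curr ^= num
--         even_cnt += 1 - (num & 1)
--         odd_cnt += num & 1
--         if (even_cnt - odd_cnt, curr) in seen:
--             ret = max(ret, i - seen[(even_cnt - odd_cnt, curr)])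
--         if (even_cnt - odd_cnt, curr) not in seen:
--             seen[(even_cnt - odd_cnt, curr)] = i
--     return ret
-- ===== SOURCE B (Python) =====
-- from typing import List
--
-- def maxBalancedSubarray(nums: List[int]) -> int:
--     # brute force: try every start index, re-scan to every end
--     ret = 0
--     for i in range(len(nums)):
--         x = 0
--         bal = 0
--         length = 0
--         for v in nums[i:]:
--             x ^= v
--             bal += 1 if v % 2 == 0 else -1
--             length += 1
--             if x == 0 and bal == 0:
--                 ret = max(ret, length)
--     return ret
-- ===== Notes on version B (the rewrite author's own statement) =====
-- stated objective: alternative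
-- what changed: Replaces the single-pass hashmap of first-seen (balance, xor) prefix states with a brute-force nested double loop: for each start index it re-scans forward keeping a running xor and even/odd balance and records the window length whenever both are zero; no prefix states or first-occurrence lookup exist at all.
import Mathlib
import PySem

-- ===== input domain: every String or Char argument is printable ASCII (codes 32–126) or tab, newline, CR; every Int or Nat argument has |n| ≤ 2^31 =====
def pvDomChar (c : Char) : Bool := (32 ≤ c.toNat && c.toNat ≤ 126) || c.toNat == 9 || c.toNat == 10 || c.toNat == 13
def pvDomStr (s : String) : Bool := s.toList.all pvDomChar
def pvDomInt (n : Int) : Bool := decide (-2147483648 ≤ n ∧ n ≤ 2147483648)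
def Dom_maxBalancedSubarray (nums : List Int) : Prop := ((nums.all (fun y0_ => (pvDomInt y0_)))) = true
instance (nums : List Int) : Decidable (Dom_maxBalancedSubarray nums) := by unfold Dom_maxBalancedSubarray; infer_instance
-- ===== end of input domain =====

-- B replaces A's single-pass first-seen hashmap of (balance, xor) prefix states by a brute-force
-- nested double loop re-scanning from every start index (alternative algorithm, not faster).

-- ===== PORT A =====
-- state: (ret, even_cnt, odd_cnt, seen, curr)
def maxBalancedSubarray (nums : List Int) : Int :=
  ((PySem.List.enumerate nums 0).foldl
    (fun (st : Int × Int × Int × PySem.Dict (Int × Int) Int × Int) p =>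
      let curr := PySem.Int.bxor st.2.2.2.2 p.2
      let evenCnt := st.2.1 + (1 - PySem.Int.band p.2 1)
      let oddCnt := st.2.2.1 + PySem.Int.band p.2 1
      let key := (evenCnt - oddCnt, curr)
      let ret := match (st.2.2.2.1).get? key with
        | some w => max st.1 (p.1 - w)
        | none => st.1
      let seen := if (st.2.2.2.1).contains key then st.2.2.2.1 else (st.2.2.2.1).insert key p.1
      (ret, evenCnt, oddCnt, seen, curr))
    (0, 0, 0, (PySem.Dict.empty).insert ((0 : Int), (0 : Int)) (-1), 0)).1

-- ===== PORT B =====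
-- inner-loop state: (x, bal, length, ret); one step processes one element v of nums[i:]
def pvIStep (st : Int × Int × Int × Int) (v : Int) : Int × Int × Int × Int :=
  let x := PySem.Int.bxor st.1 v
  let bal := st.2.1 + (if PySem.Int.mod v 2 = 0 then (1 : Int) else -1)
  let len := st.2.2.1 + 1
  (x, bal, len, if x = 0 ∧ bal = 0 then max st.2.2.2 len else st.2.2.2)

def maxBalancedSubarray_alt (nums : List Int) : Int :=
  (PySem.List.pyRange 0 (nums.length : Int) 1).foldl
    (fun ret i =>
      ((PySem.List.slice nums (some i) none).foldl pvIStep ((0 : Int), (0 : Int), (0 : Int), ret)).2.2.2)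
    0

-- ===== PRECONDITION & SPEC =====
def Spec_maxBalancedSubarray (nums : List Int) (out : Int) : Prop := out = maxBalancedSubarray_alt nums
instance (nums : List Int) (out : Int) : Decidable (Spec_maxBalancedSubarray nums out) := by unfold Spec_maxBalancedSubarray; infer_instance

-- ===== CLAIM (what is proved, stated in full; the proofs are below) =====
def Claim_equal_maxBalancedSubarray : Prop := ∀ (nums : List Int), Dom_maxBalancedSubarray nums → Spec_maxBalancedSubarray nums (maxBalancedSubarray nums)

-- ===== LEMMAS AND PROOFS =====

-- A's fold step and initial state, named for the proofs (definitionally the ones in the port)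
def pvAStep (st : Int × Int × Int × PySem.Dict (Int × Int) Int × Int) (p : Int × Int) :
    Int × Int × Int × PySem.Dict (Int × Int) Int × Int :=
  let curr := PySem.Int.bxor st.2.2.2.2 p.2
  let evenCnt := st.2.1 + (1 - PySem.Int.band p.2 1)
  let oddCnt := st.2.2.1 + PySem.Int.band p.2 1
  let key := (evenCnt - oddCnt, curr)
  let ret := match (st.2.2.2.1).get? key with
    | some w => max st.1 (p.1 - w)
    | none => st.1
  let seen := if (st.2.2.2.1).contains key then st.2.2.2.1 else (st.2.2.2.1).insert key p.1
  (ret, evenCnt, oddCnt, seen, curr)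

def pvAInit : Int × Int × Int × PySem.Dict (Int × Int) Int × Int :=
  (0, 0, 0, (PySem.Dict.empty).insert ((0 : Int), (0 : Int)) (-1), 0)

-- the balance step shared by the ghost prefix-state list and B's inner loop
def pvBalStep (b v : Int) : Int := b + (if PySem.Int.mod v 2 = 0 then (1 : Int) else -1)

-- GHOST: the prefix-state list builder (used only in the proofs, by neither port)
def pvGStep (acc : List (Int × Int) × Int × Int) (v : Int) : List (Int × Int) × Int × Int :=
  let x := PySem.Int.bxor acc.2.1 v
  let b := pvBalStep acc.2.2 v
  (acc.1 ++ [(b, x)], x, b)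

def pvGInit : List (Int × Int) × Int × Int := ([((0 : Int), (0 : Int))], 0, 0)

-- GHOST: first-occurrence scan over the prefix-state list (the quantity A computes)
def pvM (l : List (Int × Int)) : Int :=
  (PySem.List.enumerate l 0).foldl
    (fun ret p =>
      match PySem.List.index? l p.2 with
      | some k => max ret (p.1 - (k : Int))
      | none => ret)
    0

-- prefix quantities: xor and balance of the first k elements
def pvSx (nums : List Int) (k : Nat) : Int := (nums.take k).foldl PySem.Int.bxor 0
def pvSb (nums : List Int) (k : Nat) : Int := (nums.take k).foldl pvBalStep 0
def pvS (nums : List Int) (k : Nat) : Int × Int := (pvSb nums k, pvSx nums k)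

-- a contiguous chunk is "good" iff its xor and its balance are both zero
def pvGood (l : List Int) : Bool :=
  (l.foldl PySem.Int.bxor 0 == 0) && (l.foldl pvBalStep 0 == 0)

-- the common optimum characterisation: r is the answer iff
def pvOptUB (nums : List Int) (r : Int) : Prop :=
  ∀ p q : Nat, p ≤ q → q ≤ nums.length → pvS nums p = pvS nums q → ((q : Int) - (p : Int)) ≤ r
def pvOptAtt (nums : List Int) (r : Int) : Prop :=
  r = 0 ∨ ∃ p q : Nat, p ≤ q ∧ q ≤ nums.length ∧ pvS nums p = pvS nums q ∧ r = (q : Int) - (p : Int)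

theorem pvOpt_unique (nums : List Int) (r1 r2 : Int)
    (h1n : 0 ≤ r1) (h1u : pvOptUB nums r1) (h1a : pvOptAtt nums r1)
    (h2n : 0 ≤ r2) (h2u : pvOptUB nums r2) (h2a : pvOptAtt nums r2) : r1 = r2 := by
  apply le_antisymm
  · rcases h1a with h | ⟨p, q, hpq, hq, hs, rfl⟩
    · omega
    · exact h2u p q hpq hq hs
  · rcases h2a with h | ⟨p, q, hpq, hq, hs, rfl⟩
    · omega
    · exact h1u p q hpq hq hs

-- ---------- xor algebra ----------
theorem pvBxorEq (a b : Int) : PySem.Int.bxor a b = Int.xor a b := by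
  rcases a with m | m <;> rcases b with n | n <;>
    simp [PySem.Int.bxor, Int.xor, Int.negSucc_eq] <;> omega

theorem pvXorAssoc (a b c : Int) : Int.xor (Int.xor a b) c = Int.xor a (Int.xor b c) := by
  rcases a with m | m <;> rcases b with n | n <;> rcases c with k | k <;>
    simp only [Int.xor] <;> rw [Nat.xor_assoc]

theorem pvBxor_assoc (a b c : Int) :
    PySem.Int.bxor (PySem.Int.bxor a b) c = PySem.Int.bxor a (PySem.Int.bxor b c) := by
  simp only [pvBxorEq]; exact pvXorAssoc a b c

theorem pvBxor_zero_left (a : Int) : PySem.Int.bxor 0 a = a := by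
  rw [PySem.Int.bxor_comm]; exact PySem.Int.bxor_zero a

theorem pvBxor_cancel (a t : Int) : PySem.Int.bxor a t = a ↔ t = 0 := by
  constructor
  · intro h
    have := congrArg (PySem.Int.bxor a) h
    rwa [← pvBxor_assoc, PySem.Int.bxor_self, pvBxor_zero_left] at this
  · intro h; subst h; exact PySem.Int.bxor_zero a

theorem pvFoldX_shift (l : List Int) : ∀ x : Int,
    l.foldl PySem.Int.bxor x = PySem.Int.bxor x (l.foldl PySem.Int.bxor 0) := by
  induction l with
  | nil => intro x; simp
  | cons v t ih =>
    intro x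
    simp only [List.foldl_cons]
    rw [ih (PySem.Int.bxor x v), ih (PySem.Int.bxor 0 v), pvBxor_zero_left, pvBxor_assoc]

theorem pvFoldB_shift (l : List Int) : ∀ b : Int,
    l.foldl pvBalStep b = b + l.foldl pvBalStep 0 := by
  induction l with
  | nil => intro b; simp
  | cons v t ih =>
    intro b
    simp only [List.foldl_cons]
    rw [ih (pvBalStep b v), ih (pvBalStep 0 v)]
    simp only [pvBalStep]; ring

-- S q = S p iff the chunk between them is good
theorem pvGood_iff (nums : List Int) (p q : Nat) (hpq : p ≤ q) :
    pvS nums q = pvS nums p ↔ pvGood ((nums.drop p).take (q - p)) = true := by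
  have hsplit : nums.take q = nums.take p ++ (nums.drop p).take (q - p) := by
    rw [← List.take_add]
    congr 1
    omega
  unfold pvGood pvS pvSx pvSb
  rw [hsplit, List.foldl_append, List.foldl_append,
    pvFoldX_shift ((nums.drop p).take (q - p)), pvFoldB_shift ((nums.drop p).take (q - p))]
  rw [Prod.ext_iff]
  simp only [Bool.and_eq_true, beq_iff_eq]
  constructor
  · rintro ⟨hb, hx⟩
    exact ⟨(pvBxor_cancel _ _).1 hx, by omega⟩
  · rintro ⟨hx, hb⟩
    exact ⟨by omega, by rw [hx, PySem.Int.bxor_zero]⟩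

-- ---------- the ghost prefix-state list ----------
theorem pvGFold_snd (ns : List Int) : ∀ acc : List (Int × Int) × Int × Int,
    (ns.foldl pvGStep acc).2.1 = ns.foldl PySem.Int.bxor acc.2.1 ∧
    (ns.foldl pvGStep acc).2.2 = ns.foldl pvBalStep acc.2.2 := by
  induction ns with
  | nil => intro acc; exact ⟨rfl, rfl⟩
  | cons v t ih => intro acc; exact ih _

theorem pvPre_eq (nums : List Int) :
    (nums.foldl pvGStep pvGInit).1 = (List.range (nums.length + 1)).map (pvS nums) := by
  induction nums using List.reverseRecOn with
  | nil => simp [pvGInit, pvS, pvSx, pvSb]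
  | append_singleton ns v ih =>
    rw [List.foldl_append]
    have hx : (ns.foldl pvGStep pvGInit).2.1 = ns.foldl PySem.Int.bxor 0 := by
      simpa [pvGInit] using (pvGFold_snd ns pvGInit).1
    have hb : (ns.foldl pvGStep pvGInit).2.2 = ns.foldl pvBalStep 0 := by
      simpa [pvGInit] using (pvGFold_snd ns pvGInit).2
    have hstep : ([v].foldl pvGStep (ns.foldl pvGStep pvGInit)).1
        = (ns.foldl pvGStep pvGInit).1 ++
          [(pvBalStep (ns.foldl pvBalStep 0) v,
            PySem.Int.bxor (ns.foldl PySem.Int.bxor 0) v)] := by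
      simp only [List.foldl_cons, List.foldl_nil, pvGStep, hx, hb]
    rw [hstep, ih]
    conv_rhs => rw [show (ns ++ [v]).length + 1 = (ns.length + 1) + 1 by simp,
      List.range_succ, List.map_append]
    congr 1
    · apply List.map_congr_left
      intro k hk
      rw [List.mem_range] at hk
      unfold pvS pvSx pvSb
      rw [List.take_append_of_le_length (by omega)]
    · simp only [List.map_cons, List.map_nil]
      unfold pvS pvSx pvSb
      rw [List.take_of_length_le (by simp), List.foldl_append, List.foldl_append]
      simp

-- ---------- generic fold-max lemmas ----------
theorem pvFold_mono {α : Type} (l : List α) (f : Int → α → Int)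
    (hf : ∀ acc a, a ∈ l → acc ≤ f acc a) : ∀ r0 : Int, r0 ≤ l.foldl f r0 := by
  induction l with
  | nil => intro r0; exact le_refl _
  | cons a t ih =>
    intro r0
    exact le_trans (hf r0 a (by simp)) (ih (fun acc b hb => hf acc b (by simp [hb])) _)

theorem pvFold_at {α : Type} (l : List α) (f : Int → α → Int)
    (hf : ∀ acc a, a ∈ l → acc ≤ f acc a) (a : α) (ha : a ∈ l) (w : Int)
    (hw : ∀ acc, w ≤ f acc a) : ∀ r0 : Int, w ≤ l.foldl f r0 := by
  induction l with
  | nil => cases ha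
  | cons b t ih =>
    intro r0
    rcases List.mem_cons.1 ha with rfl | hmem
    · exact le_trans (hw r0) (pvFold_mono t f (fun acc c hc => hf acc c (by simp [hc])) _)
    · exact ih (fun acc c hc => hf acc c (by simp [hc])) hmem _

theorem pvFold_pres {α : Type} (l : List α) (f : Int → α → Int) (P : Int → Prop)
    (hf : ∀ acc a, a ∈ l → P acc → P (f acc a)) : ∀ r0 : Int, P r0 → P (l.foldl f r0) := by
  induction l with
  | nil => intro r0 h; exact h
  | cons a t ih =>
    intro r0 h
    exact ih (fun acc b hb => hf acc b (by simp [hb])) _ (hf r0 a (by simp) h)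

-- conditional-max fold shape: foldl (fun r m => if c m then max r (h m) else r)
theorem pvCMax_step_mono {α : Type} (c : α → Bool) (h : α → Int) (acc : Int) (a : α) :
    acc ≤ (if c a then max acc (h a) else acc) := by
  split_ifs <;> simp

theorem pvCMax_le {α : Type} (l : List α) (c : α → Bool) (h : α → Int) (r0 : Int) :
    r0 ≤ l.foldl (fun r m => if c m then max r (h m) else r) r0 :=
  pvFold_mono l _ (fun acc a _ => pvCMax_step_mono c h acc a) r0

theorem pvCMax_mem {α : Type} (l : List α) (c : α → Bool) (h : α → Int) (r0 : Int)
    (a : α) (ha : a ∈ l) (hc : c a = true) :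
    h a ≤ l.foldl (fun r m => if c m then max r (h m) else r) r0 :=
  pvFold_at l _ (fun acc b _ => pvCMax_step_mono c h acc b) a ha (h a)
    (fun acc => by simp [hc]) r0

theorem pvCMax_att {α : Type} (l : List α) (c : α → Bool) (h : α → Int) :
    ∀ r0 : Int, l.foldl (fun r m => if c m then max r (h m) else r) r0 = r0 ∨
      ∃ a ∈ l, c a = true ∧
        l.foldl (fun r m => if c m then max r (h m) else r) r0 = h a := by
  induction l with
  | nil => intro r0; left; rfl
  | cons a t ih =>
    intro r0
    simp only [List.foldl_cons]
    by_cases hc : c a = true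
    · rw [if_pos hc]
      rcases ih (max r0 (h a)) with heq | ⟨b, hb, hcb, heq⟩
      · rcases max_choice r0 (h a) with hm | hm
        · left; rw [heq, hm]
        · right; exact ⟨a, by simp, hc, by rw [heq, hm]⟩
      · right; exact ⟨b, by simp [hb], hcb, heq⟩
    · rw [if_neg hc]
      rcases ih r0 with heq | ⟨b, hb, hcb, heq⟩
      · left; exact heq
      · right; exact ⟨b, by simp [hb], hcb, heq⟩

-- ---------- B's inner loop characterised as a conditional-max fold ----------
theorem pvI_comps (ds : List Int) : ∀ st : Int × Int × Int × Int,
    (ds.foldl pvIStep st).1 = ds.foldl PySem.Int.bxor st.1 ∧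
    (ds.foldl pvIStep st).2.1 = ds.foldl pvBalStep st.2.1 ∧
    (ds.foldl pvIStep st).2.2.1 = st.2.2.1 + (ds.length : Int) := by
  induction ds with
  | nil => intro st; exact ⟨rfl, rfl, by simp⟩
  | cons v t ih =>
    intro st
    obtain ⟨h1, h2, h3⟩ := ih (pvIStep st v)
    refine ⟨h1, by simpa [pvIStep, pvBalStep] using h2, ?_⟩
    rw [List.foldl_cons, h3]
    simp [pvIStep]
    ring

theorem pvInner_char (ds : List Int) (r0 : Int) :
    (ds.foldl pvIStep (0, 0, 0, r0)).2.2.2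
      = (List.range ds.length).foldl
          (fun r m => if pvGood (ds.take (m + 1)) then max r ((m : Int) + 1) else r) r0 := by
  induction ds using List.reverseRecOn with
  | nil => rfl
  | append_singleton ds v ih =>
    rw [List.foldl_append]
    obtain ⟨h1, h2, h3⟩ := pvI_comps ds ((0 : Int), (0 : Int), (0 : Int), r0)
    have hret : ([v].foldl pvIStep (ds.foldl pvIStep (0, 0, 0, r0))).2.2.2
        = if PySem.Int.bxor (ds.foldl PySem.Int.bxor 0) v = 0 ∧
             pvBalStep (ds.foldl pvBalStep 0) v = 0
          then max (ds.foldl pvIStep (0, 0, 0, r0)).2.2.2 ((ds.length : Int) + 1)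
          else (ds.foldl pvIStep (0, 0, 0, r0)).2.2.2 := by
      simp only [List.foldl_cons, List.foldl_nil, pvIStep, h1, h2, h3, pvBalStep]
      norm_num
    rw [hret, ih]
    have hlen : (ds ++ [v]).length = ds.length + 1 := by simp
    rw [hlen, List.range_succ, List.foldl_append]
    have hcongr : (List.range ds.length).foldl
        (fun r m => if pvGood ((ds ++ [v]).take (m + 1)) then max r ((m : Int) + 1) else r) r0
        = (List.range ds.length).foldl
        (fun r m => if pvGood (ds.take (m + 1)) then max r ((m : Int) + 1) else r) r0 := by
      apply PySem.List.foldl_congr_mem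
      intro acc m hm
      rw [List.mem_range] at hm
      rw [List.take_append_of_le_length (by omega)]
    rw [hcongr]
    simp only [List.foldl_cons, List.foldl_nil]
    have htake : (ds ++ [v]).take (ds.length + 1) = ds ++ [v] :=
      List.take_of_length_le (by simp)
    rw [htake]
    have hgood : pvGood (ds ++ [v]) = true ↔
        (PySem.Int.bxor (ds.foldl PySem.Int.bxor 0) v = 0 ∧
          pvBalStep (ds.foldl pvBalStep 0) v = 0) := by
      unfold pvGood
      rw [List.foldl_append, List.foldl_append]
      simp
    by_cases hg : pvGood (ds ++ [v]) = true
    · rw [if_pos (hgood.1 hg), if_pos hg]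
    · rw [if_neg (fun h => hg (hgood.2 h)), if_neg hg]

-- ---------- the three optimum properties for B ----------
def pvOuterStep (nums : List Int) (ret : Int) (k : Nat) : Int :=
  ((nums.drop k).foldl pvIStep (0, 0, 0, ret)).2.2.2

theorem pvAlt_eq (nums : List Int) :
    maxBalancedSubarray_alt nums = (List.range nums.length).foldl (pvOuterStep nums) 0 := by
  unfold maxBalancedSubarray_alt pvOuterStep
  rw [PySem.List.pyRange_zero_nat, List.foldl_map]
  simp only [PySem.List.slice_from_natCast]

theorem pvOuter_char (nums : List Int) (acc : Int) (k : Nat) :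
    pvOuterStep nums acc k
      = (List.range (nums.drop k).length).foldl
          (fun r m => if pvGood ((nums.drop k).take (m + 1)) then max r ((m : Int) + 1) else r)
          acc := pvInner_char (nums.drop k) acc

theorem pvOuter_mono (nums : List Int) (acc : Int) (k : Nat) :
    acc ≤ pvOuterStep nums acc k := by
  rw [pvOuter_char]
  exact pvCMax_le _ _ _ _

theorem pvAlt_nonneg (nums : List Int) : 0 ≤ maxBalancedSubarray_alt nums := by
  rw [pvAlt_eq]
  exact pvFold_mono _ _ (fun acc a _ => pvOuter_mono nums acc a) 0

theorem pvAlt_ub (nums : List Int) : pvOptUB nums (maxBalancedSubarray_alt nums) := by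
  intro p q hpq hqn hs
  rcases Nat.lt_or_ge p q with hlt | hge
  · rw [pvAlt_eq]
    apply pvFold_at _ _ (fun acc a _ => pvOuter_mono nums acc a) p
      (List.mem_range.2 (by omega)) _ _ 0
    intro acc
    rw [pvOuter_char]
    have hmem : q - p - 1 ∈ List.range (nums.drop p).length := by
      rw [List.mem_range, List.length_drop]
      omega
    have hcnd : pvGood ((nums.drop p).take (q - p - 1 + 1)) = true := by
      rw [show q - p - 1 + 1 = q - p by omega]
      exact (pvGood_iff nums p q hpq).1 hs.symm
    have := pvCMax_mem (List.range (nums.drop p).length)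
      (fun m => pvGood ((nums.drop p).take (m + 1))) (fun m => (m : Int) + 1) acc
      (q - p - 1) hmem hcnd
    simp only [] at this
    omega
  · have hpq' : p = q := by omega
    subst hpq'
    simpa using pvAlt_nonneg nums

theorem pvAlt_att (nums : List Int) : pvOptAtt nums (maxBalancedSubarray_alt nums) := by
  rw [pvAlt_eq]
  apply pvFold_pres _ _ (pvOptAtt nums) ?_ 0 (Or.inl rfl)
  intro acc k hk hP
  rw [List.mem_range] at hk
  rw [pvOuter_char]
  rcases pvCMax_att (List.range (nums.drop k).length)
      (fun m => pvGood ((nums.drop k).take (m + 1))) (fun m => (m : Int) + 1) acc with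
    heq | ⟨m, hm, hc, heq⟩
  · rw [heq]; exact hP
  · rw [heq]
    right
    rw [List.mem_range, List.length_drop] at hm
    refine ⟨k, k + (m + 1), by omega, by omega, ?_, by push_cast; ring⟩
    have := (pvGood_iff nums k (k + (m + 1)) (by omega)).2
      (by rw [show k + (m + 1) - k = m + 1 by omega]; exact hc)
    exact this.symm

-- ---------- the three optimum properties for pvM of the ghost list ----------
theorem pvM_le_foldl (L : List (Int × Int)) (l2 : List (Int × Int × Int)) (init : Int) :
    init ≤ l2.foldl
      (fun ret p =>
        match PySem.List.index? L p.2 with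
        | some k => max ret (p.1 - (k : Int))
        | none => ret) init := by
  induction l2 generalizing init with
  | nil => exact le_refl _
  | cons p t ih =>
    simp only [List.foldl_cons]
    refine le_trans ?_ (ih _)
    simp only [PySem.List.index?_eq_idxOf?]
    cases List.idxOf? p.2 L <;> simp

theorem pvM_nonneg (l : List (Int × Int)) : 0 ≤ pvM l := pvM_le_foldl l _ 0

theorem pvIdxApp (l : List (Int × Int)) (c s : Int × Int) :
    PySem.List.index? (l ++ [c]) s =
      if s ∈ l then PySem.List.index? l s
      else if s = c then some l.length else none := by
  split_ifs with h1 h2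
  · exact PySem.List.index?_append_of_mem _ h1
  · subst h2; exact PySem.List.index?_append_singleton_self (l := l) (c := s) h1
  · rw [PySem.List.index?_eq_none_iff]
    simp [h1, h2]

theorem pvM_append (l : List (Int × Int)) (c : Int × Int) :
    pvM (l ++ [c]) =
      match PySem.List.index? (l ++ [c]) c with
      | some k => max (pvM l) ((l.length : Int) - (k : Int))
      | none => pvM l := by
  unfold pvM
  rw [PySem.List.enumerate_append, List.foldl_append]
  have hcongr :
      (PySem.List.enumerate l 0).foldl
        (fun ret p =>
          match PySem.List.index? (l ++ [c]) p.2 with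
          | some k => max ret (p.1 - (k : Int))
          | none => ret) 0 =
      (PySem.List.enumerate l 0).foldl
        (fun ret p =>
          match PySem.List.index? l p.2 with
          | some k => max ret (p.1 - (k : Int))
          | none => ret) 0 := by
    apply PySem.List.foldl_congr_mem
    intro acc p hp
    obtain ⟨k, hk, rfl⟩ := (PySem.List.mem_enumerate_iff _ _ _).1 hp
    rw [PySem.List.index?_append_of_mem _ (l.getElem_mem hk)]
  simp only [PySem.List.enumerate_cons, PySem.List.enumerate_nil, List.foldl_cons, List.foldl_nil,
    zero_add, hcongr]

theorem pvM_ub (L : List (Int × Int)) : ∀ p q : Nat, p ≤ q → q < L.length →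
    L[p]? = L[q]? → (q : Int) - (p : Int) ≤ pvM L := by
  induction L using List.reverseRecOn with
  | nil => intro p q _ hq _; simp at hq
  | append_singleton l c ih =>
    intro p q hpq hq heq
    have hcm : c ∈ l ++ [c] := by simp
    rcases Option.isSome_iff_exists.mp ((PySem.List.index?_isSome_iff _ _).2 hcm) with ⟨k0, hk0⟩
    obtain ⟨hk0lt, hk0get, hk0min⟩ := PySem.List.getElem_of_index?_eq_some hk0
    rw [pvM_append, hk0]
    show (q : Int) - (p : Int) ≤ max (pvM l) ((l.length : Int) - (k0 : Int))
    by_cases hql : q < l.length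
    · have hpl : p < l.length := lt_of_le_of_lt hpq hql
      have heq' : l[p]? = l[q]? := by
        rwa [List.getElem?_append_left hpl, List.getElem?_append_left hql] at heq
      exact le_trans (ih p q hpq hql heq') (le_max_left _ _)
    · have hqeq : q = l.length := by
        rw [List.length_append, List.length_singleton] at hq
        omega
      subst hqeq
      have hqc : (l ++ [c])[l.length]? = some c := by simp
      by_cases hpl : p < l.length
      · have hpc : (l ++ [c])[p] = c := by
          have : (l ++ [c])[p]? = some c := heq.trans hqc
          rwa [List.getElem?_eq_getElem (by simp; omega), Option.some_inj] at this
        have hk0p : k0 ≤ p := by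
          by_contra hgt
          exact (hk0min p (by omega)) hpc
        have h1 : ((l.length : Int)) - (p : Int) ≤ ((l.length : Int)) - (k0 : Int) := by omega
        exact le_trans h1 (le_max_right _ _)
      · have hpeq : p = l.length := by omega
        subst hpeq
        have : (0 : Int) ≤ pvM l := pvM_nonneg l
        have h2 : (0 : Int) ≤ max (pvM l) ((l.length : Int) - (k0 : Int)) :=
          le_trans this (le_max_left _ _)
        omega

theorem pvM_att (L : List (Int × Int)) :
    pvM L = 0 ∨ ∃ q k : Nat, k ≤ q ∧ q < L.length ∧ L[k]? = L[q]? ∧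
      pvM L = (q : Int) - (k : Int) := by
  induction L using List.reverseRecOn with
  | nil => left; rfl
  | append_singleton l c ih =>
    have hcm : c ∈ l ++ [c] := by simp
    rcases Option.isSome_iff_exists.mp ((PySem.List.index?_isSome_iff _ _).2 hcm) with ⟨k0, hk0⟩
    obtain ⟨hk0lt, hk0get, hk0min⟩ := PySem.List.getElem_of_index?_eq_some hk0
    have hM : pvM (l ++ [c]) = max (pvM l) ((l.length : Int) - (k0 : Int)) := by
      rw [pvM_append, hk0]
    rcases max_choice (pvM l) ((l.length : Int) - (k0 : Int)) with hm | hm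
    · rcases ih with h0 | ⟨q, k, hkq, hq, heq, hval⟩
      · left; rw [hM, hm]; exact h0
      · right
        refine ⟨q, k, hkq, by simp; omega, ?_, by rw [hM, hm]; exact hval⟩
        rw [List.getElem?_append_left (lt_of_le_of_lt hkq hq), List.getElem?_append_left hq]
        exact heq
    · right
      have hk0le : k0 ≤ l.length := by
        rw [List.length_append, List.length_singleton] at hk0lt
        omega
      refine ⟨l.length, k0, hk0le, by simp, ?_, by rw [hM, hm]⟩
      have h1 : (l ++ [c])[k0]? = some c := by
        rw [List.getElem?_eq_getElem hk0lt, hk0get]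
      have h2 : (l ++ [c])[l.length]? = some c := by simp
      rw [h1, h2]

-- ---------- A computes pvM of the ghost list (invariant proof) ----------
theorem pvBand01 (v : Int) : PySem.Int.band v 1 = 0 ∨ PySem.Int.band v 1 = 1 := by
  rw [PySem.Int.band_one]
  have h1 := PySem.Int.mod_nonneg v (b := 2) (by norm_num)
  have h2 := PySem.Int.mod_lt v (b := 2) (by norm_num)
  omega

theorem pvA_eq (nums : List Int) :
    maxBalancedSubarray nums = ((PySem.List.enumerate nums 0).foldl pvAStep pvAInit).1 := rfl

-- the joint invariant of A and the ghost list after consuming the same input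
def pvInv (ns : List Int) : Prop :=
  let a := (PySem.List.enumerate ns 0).foldl pvAStep pvAInit
  let t := ns.foldl pvGStep pvGInit
  a.2.2.2.2 = t.2.1 ∧
  a.2.1 - a.2.2.1 = t.2.2 ∧
  (∀ s : Int × Int, (a.2.2.2.1).get? s =
      (PySem.List.index? t.1 s).map (fun k => (k : Int) - 1)) ∧
  t.1.length = ns.length + 1 ∧
  a.1 = pvM t.1

theorem pvInv_holds (ns : List Int) : pvInv ns := by
  induction ns using List.reverseRecOn with
  | nil =>
    refine ⟨rfl, rfl, ?_, rfl, ?_⟩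
    · intro s
      by_cases h : s = ((0 : Int), (0 : Int))
      · subst h; rfl
      · simp only [pvAInit, PySem.List.enumerate_nil, List.foldl_nil]
        rw [PySem.Dict.get?_insert_of_ne _ _ h]
        rw [show PySem.List.index? (pvGInit).1 s = none from
          (PySem.List.index?_eq_none_iff _ _).2 (by simpa [pvGInit] using h)]
        simp [PySem.Dict.get?_empty]
    · decide
  | append_singleton ns v ih =>
    obtain ⟨hcurr, hdiff, hdict, hlen, hret⟩ := ih
    set a := (PySem.List.enumerate ns 0).foldl pvAStep pvAInit with ha
    set t := ns.foldl pvGStep pvGInit with ht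
    have hA : (PySem.List.enumerate (ns ++ [v]) 0).foldl pvAStep pvAInit
        = pvAStep a (((ns.length : Int)), v) := by
      rw [PySem.List.enumerate_append, List.foldl_append]
      simp only [PySem.List.enumerate_cons, PySem.List.enumerate_nil, List.foldl_cons,
        List.foldl_nil, zero_add]
      rfl
    have hB : (ns ++ [v]).foldl pvGStep pvGInit = pvGStep t v := by
      rw [List.foldl_append]; rfl
    -- the new prefix state
    have hkey : (a.2.1 + (1 - PySem.Int.band v 1) - (a.2.2.1 + PySem.Int.band v 1),
        PySem.Int.bxor a.2.2.2.2 v)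
        = (pvBalStep t.2.2 v, PySem.Int.bxor t.2.1 v) := by
      have hm0 : PySem.Int.mod v 2 = PySem.Int.band v 1 := (PySem.Int.band_one v).symm
      rcases pvBand01 v with h | h
      · have hdvd : (2 : Int) ∣ v := (PySem.Int.mod_eq_zero_iff_dvd v 2).1 (by rw [hm0, h])
        simp [pvBalStep, h, hdvd, hcurr, ← hdiff]
        try ring
      · have hndvd : ¬ (2 : Int) ∣ v := by
          rw [← PySem.Int.mod_eq_zero_iff_dvd, hm0, h]
          norm_num
        simp [pvBalStep, h, hndvd, hcurr, ← hdiff]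
        try ring
    simp only [pvInv, hA, hB]
    set c : Int × Int := (pvBalStep t.2.2 v, PySem.Int.bxor t.2.1 v) with hc
    have hstepB : pvGStep t v = (t.1 ++ [c], c.2, c.1) := rfl
    have hAc : pvAStep a ((ns.length : Int), v) =
        (match a.2.2.2.1.get? c with
          | some w => max a.1 ((ns.length : Int) - w)
          | none => a.1,
         a.2.1 + (1 - PySem.Int.band v 1), a.2.2.1 + PySem.Int.band v 1,
         (if a.2.2.2.1.contains c then a.2.2.2.1 else a.2.2.2.1.insert c (ns.length : Int)),
         PySem.Int.bxor a.2.2.2.2 v) := by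
      simp only [pvAStep, hkey]
    rw [hAc, hstepB]
    refine ⟨by simpa using congrArg Prod.snd hkey, ?_, ?_, ?_, ?_⟩
    · simpa using congrArg Prod.fst hkey
    · -- dict invariant
      intro s
      by_cases hcmem : c ∈ t.1
      · have hidx : ∃ k, PySem.List.index? t.1 c = some k := by
          rcases Option.isSome_iff_exists.mp ((PySem.List.index?_isSome_iff _ _).2 hcmem) with ⟨k, hk⟩
          exact ⟨k, hk⟩
        obtain ⟨k, hk⟩ := hidx
        have hcont : a.2.2.2.1.contains c = true := by
          rw [PySem.Dict.contains_eq_isSome_get?, hdict c, hk]; rfl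
        simp only [hcont, if_true]
        rw [hdict s, pvIdxApp]
        by_cases h1 : s ∈ t.1
        · rw [if_pos h1]
        · rw [if_neg h1]
          by_cases h2 : s = c
          · exact absurd (h2 ▸ hcmem) h1
          · rw [if_neg h2, (PySem.List.index?_eq_none_iff _ _).2 h1]
      · have hnone : PySem.List.index? t.1 c = none := (PySem.List.index?_eq_none_iff _ _).2 hcmem
        have hcont : a.2.2.2.1.contains c = false := by
          rw [PySem.Dict.contains_eq_isSome_get?, hdict c, hnone]; rfl
        simp only [hcont, Bool.false_eq_true, if_false]
        by_cases hs : s = c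
        · subst hs
          rw [PySem.Dict.get?_insert_self, pvIdxApp]
          simp [hcmem, hlen]
        · rw [PySem.Dict.get?_insert_of_ne _ _ hs, hdict s, pvIdxApp]
          by_cases h1 : s ∈ t.1
          · rw [if_pos h1]
          · rw [if_neg h1, if_neg hs, (PySem.List.index?_eq_none_iff _ _).2 h1]
    · simp [hlen]
    · -- ret invariant
      rw [pvM_append]
      by_cases hcmem : c ∈ t.1
      · rcases Option.isSome_iff_exists.mp ((PySem.List.index?_isSome_iff _ _).2 hcmem) with ⟨k, hk⟩
        rw [hdict c, hk, PySem.List.index?_append_of_mem _ hcmem, hk, hret]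
        simp only [Option.bind_some, Option.map_some]
        have hk' : ((t.1.length : Int)) - (k : Int) = (ns.length : Int) - ((k : Int) - 1) := by
          omega
        rw [hk']
        rfl
      · have hnone : PySem.List.index? t.1 c = none := (PySem.List.index?_eq_none_iff _ _).2 hcmem
        rw [hdict c, hnone, pvIdxApp, if_neg hcmem, if_pos rfl, hret]
        show pvM t.1 = max (pvM t.1) ((t.1.length : Int) - (t.1.length : Int))
        rw [sub_self]
        exact (max_eq_left (pvM_nonneg t.1)).symm

-- ---------- pvM of the ghost list satisfies the optimum properties over S ----------
theorem pvMS_ub (nums : List Int) : pvOptUB nums (pvM ((nums.foldl pvGStep pvGInit).1)) := by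
  intro p q hpq hq hs
  rw [pvPre_eq]
  apply pvM_ub _ p q hpq
  · simp
    omega
  · rw [List.getElem?_map, List.getElem?_map, List.getElem?_range (by omega),
      List.getElem?_range (by omega)]
    simp [hs]

theorem pvMS_att (nums : List Int) : pvOptAtt nums (pvM ((nums.foldl pvGStep pvGInit).1)) := by
  rcases pvM_att ((nums.foldl pvGStep pvGInit).1) with h | ⟨q, k, hkq, hq, heq, hval⟩
  · left; exact h
  · right
    rw [pvPre_eq] at hq heq
    simp only [List.length_map, List.length_range] at hq
    rw [List.getElem?_map, List.getElem?_map, List.getElem?_range (by omega),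
      List.getElem?_range (by omega)] at heq
    simp only [Option.map_some, Option.some.injEq] at heq
    exact ⟨k, q, hkq, by omega, heq, hval⟩

-- ===== VERDICT (by name: the statement is the Claim_ definition above) =====
theorem maxBalancedSubarray_spec : Claim_equal_maxBalancedSubarray := by
  intro nums _
  unfold Spec_maxBalancedSubarray
  rw [pvA_eq, (pvInv_holds nums).2.2.2.2]
  exact pvOpt_unique nums _ _ (pvM_nonneg _) (pvMS_ub nums) (pvMS_att nums)
    (pvAlt_nonneg nums) (pvAlt_ub nums) (pvAlt_att nums)
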